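-- pv_equiv track=rewrite | github.com/scape-agency/rite | src/rite/text/cipher.py | to_baconian_cipher
-- ===== SOURCE A (Python) =====
-- def to_baconian_cipher(text: str) -> str:
--     """
--     Encodes text using the Baconian cipher. Non-alphabetic characters are
--     ignored.
--
--     Parameters:
--     text (str): The text to encode.
--
--     Returns:
--     str: The encoded text using the Baconian cipher.
--     """
--     bacon_dict = {
--         'a': 'aaaaa', 'b': 'aaaab', 'c': 'aaaba', 'd': 'aaabb',
--         'e': 'aabaa', 'f': 'aabab', 'g': 'aabba', 'h': 'aabbb',
--         'i': 'abaaa', 'j': 'abaab', 'k': 'ababa', 'l': 'ababb',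
--         'm': 'abbaa', 'n': 'abbab', 'o': 'abbba', 'p': 'abbbb',
--         'q': 'baaaa', 'r': 'baaab', 's': 'baaba', 't': 'baabb',
--         'u': 'babaa', 'v': 'babab', 'w': 'babba', 'x': 'babbb',
--         'y': 'bbaaa', 'z': 'bbaab'
--     }
--     return ''.join(bacon_dict.get(char.lower(), '') for char in text if char.isalpha())  # noqa E501
-- ===== SOURCE B (Python) =====
-- def to_baconian_cipher(text: str) -> str:
--     """
--     Encodes text with the Baconian cipher in three staged passes instead of a
--     per-character lookup: (1) lowercase the whole text and keep the ordinals
--     of its a-z letters, (2) build the five bit-planes column-wise (one string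
--     of 'a'/'b' per binary digit position), (3) transpose the planes with
--     zip(*planes) and concatenate the 5-letter groups.
--     """
--     codes = [ord(c) - 97 for c in text.lower() if 'a' <= c <= 'z']
--     planes = [''.join('ab'[i // 2 ** k % 2] for i in codes) for k in (4, 3, 2, 1, 0)]
--     return ''.join(''.join(group) for group in zip(*planes))
-- ===== Notes on version B (the rewrite author's own statement) =====
-- stated objective: alternative
-- what changed: Replaces the single filter-and-lookup pass over a 26-entry dict with a staged columnar construction: lowercase the text and collect letter ordinals, build the five binary bit-planes as whole strings, then transpose them with zip(*planes) and join the 5-letter groups.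
import Mathlib
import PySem

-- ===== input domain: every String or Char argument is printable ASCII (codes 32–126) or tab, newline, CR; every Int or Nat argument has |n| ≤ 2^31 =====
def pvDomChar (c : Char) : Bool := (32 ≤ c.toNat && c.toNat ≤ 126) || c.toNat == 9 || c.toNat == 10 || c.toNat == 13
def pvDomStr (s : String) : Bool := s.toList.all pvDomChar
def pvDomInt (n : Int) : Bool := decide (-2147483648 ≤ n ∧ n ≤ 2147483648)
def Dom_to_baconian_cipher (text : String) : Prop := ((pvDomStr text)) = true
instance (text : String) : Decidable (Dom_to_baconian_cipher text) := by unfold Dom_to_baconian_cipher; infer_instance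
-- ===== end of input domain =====

-- B builds the cipher in staged passes (lowercase+ordinals, five binary bit-planes, transpose with zip) instead of A's per-character dict lookup; return value unchanged (alternative).


-- ===== PORT A =====
def baconDict : PySem.Dict String String := PySem.Dict.ofList
  [("a", "aaaaa"), ("b", "aaaab"), ("c", "aaaba"), ("d", "aaabb"),
   ("e", "aabaa"), ("f", "aabab"), ("g", "aabba"), ("h", "aabbb"),
   ("i", "abaaa"), ("j", "abaab"), ("k", "ababa"), ("l", "ababb"),
   ("m", "abbaa"), ("n", "abbab"), ("o", "abbba"), ("p", "abbbb"),
   ("q", "baaaa"), ("r", "baaab"), ("s", "baaba"), ("t", "baabb"),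
   ("u", "babaa"), ("v", "babab"), ("w", "babba"), ("x", "babbb"),
   ("y", "bbaaa"), ("z", "bbaab")]

-- bacon_dict.get(char.lower(), '')
def baconLookup (c : Char) : String :=
  baconDict.getD (PySem.Str.lower (String.ofList [c])) ""

-- ''.join(bacon_dict.get(char.lower(), '') for char in text if char.isalpha())
def to_baconian_cipher (text : String) : String :=
  PySem.Str.join "" ((text.toList.filter PySem.Chars.isalpha).map baconLookup)

-- ===== PORT B =====
-- [ord(c) - 97 for c in text.lower() if 'a' <= c <= 'z']
def baconOrds (text : String) : List Int :=
  ((PySem.Str.lower text).toList.filter (fun c => decide ('a' ≤ c) && decide (c ≤ 'z'))).map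
    (fun c => (c.toNat : Int) - 97)

-- ''.join('ab'[i // 2**k % 2] for i in codes): the bit i // 2**k % 2 is 0 or 1, so
-- 'ab'[bit] is exactly 'a' when the bit is 0 and 'b' when it is 1.
def baconPlane (codes : List Int) (k : Nat) : List Char :=
  codes.map (fun i => if PySem.Int.mod (PySem.Int.floordiv i ((2 : Int) ^ k)) 2 == 1 then 'b' else 'a')

-- zip(*planes) on the five equal-length planes: one char per plane (zip stops at the shortest)
def baconZip5 : List Char → List Char → List Char → List Char → List Char → List (List Char)
  | a :: as, b :: bs, c :: cs, d :: ds, e :: es => [a, b, c, d, e] :: baconZip5 as bs cs ds es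
  | _, _, _, _, _ => []

-- ''.join(''.join(group) for group in zip(*planes))
def baconAssemble (codes : List Int) : String :=
  PySem.Str.join ""
    ((baconZip5 (baconPlane codes 4) (baconPlane codes 3) (baconPlane codes 2)
        (baconPlane codes 1) (baconPlane codes 0)).map String.ofList)

def to_baconian_cipher_alt (text : String) : String :=
  baconAssemble (baconOrds text)

-- ===== PRECONDITION & SPEC =====
def Spec_to_baconian_cipher (text : String) (out : String) : Prop := out = to_baconian_cipher_alt text
instance (text : String) (out : String) : Decidable (Spec_to_baconian_cipher text out) := by unfold Spec_to_baconian_cipher; infer_instance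

-- ===== CLAIM (what is proved, stated in full; the proofs are below) =====
def Claim_equal_to_baconian_cipher : Prop := ∀ (text : String), Dom_to_baconian_cipher text → Spec_to_baconian_cipher text (to_baconian_cipher text)

-- ===== LEMMAS AND PROOFS =====
-- the k-th Baconian bit character of ordinal i, as B computes it
def baconBitChar (i : Int) (k : Nat) : Char :=
  if PySem.Int.mod (PySem.Int.floordiv i ((2 : Int) ^ k)) 2 == 1 then 'b' else 'a'

-- per-character agreement over the ASCII domain, as a Bool so it can be decided
-- (string contents are compared as char lists: BEq on String is slow in the kernel)
def baconAgree (c : Char) : Bool :=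
  (PySem.Chars.isalpha c
      == (decide ('a' ≤ PySem.Chars.lowerChar c) && decide (PySem.Chars.lowerChar c ≤ 'z')))
  && (!(PySem.Chars.isalpha c)
      || ((baconLookup c).toList
            == [baconBitChar (((PySem.Chars.lowerChar c).toNat : Int) - 97) 4,
                baconBitChar (((PySem.Chars.lowerChar c).toNat : Int) - 97) 3,
                baconBitChar (((PySem.Chars.lowerChar c).toNat : Int) - 97) 2,
                baconBitChar (((PySem.Chars.lowerChar c).toNat : Int) - 97) 1,
                baconBitChar (((PySem.Chars.lowerChar c).toNat : Int) - 97) 0]))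

set_option maxRecDepth 8000 in
theorem baconAgree_dom : ∀ n : Nat, n < 127 → baconAgree (Char.ofNat n) = true := by decide

theorem baconAgree_of_pvDomChar (c : Char) (h : pvDomChar c = true) : baconAgree c = true := by
  have hlt : c.toNat < 127 := by
    unfold pvDomChar at h
    rcases Bool.or_eq_true_iff.mp h with h | h
    · rcases Bool.or_eq_true_iff.mp h with h | h
      · rcases Bool.or_eq_true_iff.mp h with h | h
        · have := of_decide_eq_true (Bool.and_eq_true_iff.mp h).2
          omega
        · rw [Nat.beq_eq_true_eq] at h; omega
      · rw [Nat.beq_eq_true_eq] at h; omega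
    · rw [Nat.beq_eq_true_eq] at h; omega
  have := baconAgree_dom c.toNat hlt
  rwa [Char.ofNat_toNat] at this

-- zip of the five plane maps over the same code list = map of the 5-char groups
theorem zip5_planes (cs : List Int) :
    baconZip5 (baconPlane cs 4) (baconPlane cs 3) (baconPlane cs 2) (baconPlane cs 1) (baconPlane cs 0)
      = cs.map (fun i => [baconBitChar i 4, baconBitChar i 3, baconBitChar i 2,
                          baconBitChar i 1, baconBitChar i 0]) := by
  induction cs with
  | nil => rfl
  | cons i cs ih => simp [baconPlane, baconZip5, baconBitChar] at ih ⊢; exact ih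

-- filter after map = map after filter of the composition
theorem filter_map_comm (l : List Char) (f : Char → Char) (p : Char → Bool) :
    (l.map f).filter p = (l.filter (fun c => p (f c))).map f := by
  induction l with
  | nil => rfl
  | cons c l ih => by_cases h : p (f c) <;> simp [h, ih]

-- ===== VERDICT (by name: the statement is the Claim_ definition above) =====
theorem to_baconian_cipher_spec : Claim_equal_to_baconian_cipher := by
  intro text hdom
  have hall : ∀ c ∈ text.toList, pvDomChar c = true := by
    intro c hc
    unfold Dom_to_baconian_cipher pvDomStr at hdom
    exact List.all_eq_true.mp hdom c hc
  unfold Spec_to_baconian_cipher to_baconian_cipher to_baconian_cipher_alt baconAssemble baconOrds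
  rw [PySem.Str.toList_lower]
  rw [show PySem.Chars.lower text.toList = text.toList.map PySem.Chars.lowerChar from rfl]
  rw [filter_map_comm, List.map_map, zip5_planes, List.map_map, List.map_map]
  have hfilter : text.toList.filter PySem.Chars.isalpha
      = text.toList.filter (fun c => decide ('a' ≤ PySem.Chars.lowerChar c)
          && decide (PySem.Chars.lowerChar c ≤ 'z')) := by
    apply List.filter_congr
    intro c hc
    have := baconAgree_of_pvDomChar c (hall c hc)
    simp [baconAgree] at this
    simp [this.1]
  rw [← hfilter]
  congr 1
  apply List.map_congr_left
  intro c hc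
  rw [List.mem_filter] at hc
  have := baconAgree_of_pvDomChar c (hall c hc.1)
  simp [baconAgree, hc.2] at this
  have h2 := this.2
  calc baconLookup c = String.ofList (baconLookup c).toList := (String.ofList_toList).symm
    _ = _ := by rw [h2]; rfl
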